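-- pv_equiv track=rewrite | github.com/luhouyang/plant-health-decision-tree-classifier | gini_index.py | calc_class_distribution
-- ===== SOURCE A (Python) =====
-- classes = [0, 1, 2]
--
-- def calc_class_distribution(left_group, right_group):
--     left_cls_dist = []
--     right_cls_dist = []
--
--     for cls in classes:
--         if (cls in left_group):
--             true_vector = [y == cls for y in left_group]
--             left_cls_dist.append(sum(true_vector))
--         else:
--             left_cls_dist.append(0)
--
--     for cls in classes:
--         if (cls in right_group):
--             true_vector = [y == cls for y in right_group]
--             right_cls_dist.append(sum(true_vector))
--         else:
--             right_cls_dist.append(0)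
--
--     return [left_cls_dist, right_cls_dist]
-- ===== SOURCE B (Python) =====
-- CLASSES = [0, 1, 2]
--
-- def calc_class_distribution(left_group, right_group):
--     def dist(group):
--         counts = {}
--         for y in group:
--             counts[y] = counts.get(y, 0) + 1
--         return [counts.get(c, 0) for c in CLASSES]
--     return [dist(left_group), dist(right_group)]
-- ===== Notes on version B (the rewrite author's own statement) =====
-- stated objective: idiomatic
-- what changed: Replaces the per-class outer loop with a membership test plus a full rescan of the group for each class by one single pass over each group building a count table, then reading classes 0,1,2 from it with default 0.
import Mathlib
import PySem

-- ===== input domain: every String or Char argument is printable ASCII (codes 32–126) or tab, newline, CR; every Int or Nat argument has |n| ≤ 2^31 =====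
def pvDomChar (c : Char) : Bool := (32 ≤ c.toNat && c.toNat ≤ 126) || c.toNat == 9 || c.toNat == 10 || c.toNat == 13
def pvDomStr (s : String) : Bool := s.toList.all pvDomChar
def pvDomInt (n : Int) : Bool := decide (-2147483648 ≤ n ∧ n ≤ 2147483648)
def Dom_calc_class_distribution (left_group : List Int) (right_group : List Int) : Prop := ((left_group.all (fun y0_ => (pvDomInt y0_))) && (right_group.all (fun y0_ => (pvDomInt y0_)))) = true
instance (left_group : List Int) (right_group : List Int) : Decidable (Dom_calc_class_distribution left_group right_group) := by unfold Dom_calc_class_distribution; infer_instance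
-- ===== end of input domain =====

-- B is the idiomatic one-pass tally: build a count dict per group, then read classes 0,1,2 with default 0.

-- ===== PORT A =====
-- module constant `classes = [0, 1, 2]`
def pvClasses : List Int := [0, 1, 2]

-- `for cls in classes: if cls in group: append(sum([y == cls for y in group])) else append(0)`
def pvDistA (group : List Int) : List Int :=
  pvClasses.foldl
    (fun acc cls =>
      if group.contains cls then
        acc ++ [(group.map (fun y => y == cls)).foldl (fun s b => s + (if b then (1 : Int) else 0)) 0]
      else
        acc ++ [0])
    []

def calc_class_distribution (left_group : List Int) (right_group : List Int) : List (List Int) :=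
  [pvDistA left_group, pvDistA right_group]

-- ===== PORT B =====
-- one pass: counts[y] = counts.get(y, 0) + 1, then [counts.get(c, 0) for c in CLASSES]
def pvDistB (group : List Int) : List Int :=
  let counts := group.foldl (fun d y => d.insert y (d.getD y 0 + 1)) (PySem.Dict.empty : PySem.Dict Int Int)
  pvClasses.map (fun c => counts.getD c 0)

def calc_class_distribution_alt (left_group : List Int) (right_group : List Int) : List (List Int) :=
  [pvDistB left_group, pvDistB right_group]

-- ===== PRECONDITION & SPEC =====
def Spec_calc_class_distribution (left_group : List Int) (right_group : List Int) (out : List (List Int)) : Prop := out = calc_class_distribution_alt left_group right_group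
instance (left_group : List Int) (right_group : List Int) (out : List (List Int)) : Decidable (Spec_calc_class_distribution left_group right_group out) := by unfold Spec_calc_class_distribution; infer_instance

-- ===== CLAIM (what is proved, stated in full; the proofs are below) =====
def Claim_equal_calc_class_distribution : Prop := ∀ (left_group : List Int) (right_group : List Int), Dom_calc_class_distribution left_group right_group → Spec_calc_class_distribution left_group right_group (calc_class_distribution left_group right_group)

-- ===== LEMMAS AND PROOFS =====

-- A's inner sum over the boolean vector counts occurrences of cls
theorem pvSumBool_eq_count (group : List Int) (cls : Int) (init : Int) :
    (group.map (fun y => y == cls)).foldl (fun s b => s + (if b then (1 : Int) else 0)) init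
      = init + group.count cls := by
  induction group generalizing init with
  | nil => simp
  | cons x xs ih =>
    simp only [List.map_cons, List.foldl_cons, ih, List.count_cons]
    by_cases h : x = cls <;> simp [h] <;> ring

-- B's counter reads back the occurrence count
theorem pvDistB_getD (group : List Int) (c : Int) :
    (group.foldl (fun d y => d.insert y (d.getD y 0 + 1)) (PySem.Dict.empty : PySem.Dict Int Int)).getD c 0
      = group.count c := by
  rw [PySem.Dict.getD_foldl_insert_add_one]
  simp [PySem.Dict.getD_empty]

theorem pvDist_eq (group : List Int) : pvDistA group = pvDistB group := by
  have key : ∀ (c : Int) (acc : List Int),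
      (if group.contains c = true then acc ++ [((group.count c : Int))] else acc ++ [0])
        = acc ++ [((group.count c : Int))] := by
    intro c acc
    by_cases h : group.contains c = true
    · simp only [h, if_true]
    · have hc : group.count c = 0 := List.count_eq_zero_of_not_mem (by simpa using h)
      simp only [h, hc, Nat.cast_zero, Bool.false_eq_true, if_false]
  unfold pvDistA pvDistB pvClasses
  simp only [List.foldl_cons, List.foldl_nil, List.map_cons, List.map_nil, pvDistB_getD,
    pvSumBool_eq_count, zero_add]
  rw [key 0, key 1, key 2]
  rfl

-- ===== VERDICT (by name: the statement is the Claim_ definition above) =====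
theorem calc_class_distribution_spec : Claim_equal_calc_class_distribution := by
  intro l r _
  unfold Spec_calc_class_distribution calc_class_distribution calc_class_distribution_alt
  rw [pvDist_eq, pvDist_eq]
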